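-- pv_equiv track=rewrite | github.com/wesuuu/competitive-programming-practice | code-forces/trees/3-k-tree.py | ktree
-- ===== SOURCE A (Python) =====
-- import collections
--
-- def ktree(n, k):
--     m = collections.defaultdict(lambda: 0)
--     m[0] = 1
--     for i in range(1, n+1):
--         for j in range(1, k+1):
--             # calculate all the ways you can arrive at n = i using k numbers
--             diff = i - j
--             # negative numbers will not be placed into the hashmap
--             if diff in m:
--                 m[i] += m[diff]
--     return m[n]
-- ===== SOURCE B (Python) =====
-- def ktree(n, k):
--     # O(n) sliding-window prefix sum: dp[i] = dp[i-1] + ... + dp[i-k],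
--     # maintained incrementally instead of re-summing k terms per i.
--     if n < 0:
--         return 0
--     if n == 0:
--         return 1
--     if k <= 0:
--         return 0
--     dp = [1]
--     window = 0
--     for i in range(1, n + 1):
--         window += dp[i - 1]
--         if i - k - 1 >= 0:
--             window -= dp[i - k - 1]
--         dp.append(window)
--     return dp[n]
-- ===== Notes on version B (the rewrite author's own statement) =====
-- stated objective: faster
-- what changed: Replaced the dict-based double loop (for each i, sum m[i-j] over j=1..k) by a single O(n) pass that maintains the sum of the last k dp values as a sliding window, adding dp[i-1] and removing dp[i-k-1] each step.
import Mathlib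
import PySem

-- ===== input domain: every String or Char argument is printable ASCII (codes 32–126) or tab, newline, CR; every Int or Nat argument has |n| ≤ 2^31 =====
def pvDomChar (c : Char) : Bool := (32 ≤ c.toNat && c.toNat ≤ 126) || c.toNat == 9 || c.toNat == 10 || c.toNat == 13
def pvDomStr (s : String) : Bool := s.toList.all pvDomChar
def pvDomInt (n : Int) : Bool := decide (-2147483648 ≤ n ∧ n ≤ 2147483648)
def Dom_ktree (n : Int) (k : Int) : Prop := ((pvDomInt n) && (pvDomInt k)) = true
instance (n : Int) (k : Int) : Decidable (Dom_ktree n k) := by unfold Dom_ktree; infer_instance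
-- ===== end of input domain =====

-- B replaces A's O(n*k) dict double loop by an O(n) sliding-window running sum of the last k dp values.

-- ===== PORT A =====
def ktreeInner (i : Int) (m : PySem.Dict Int Int) (j : Int) : PySem.Dict Int Int :=
  let diff := i - j
  if m.contains diff then m.insert i (m.getD i 0 + m.getD diff 0) else m

def ktree (n : Int) (k : Int) : Int :=
  let m0 : PySem.Dict Int Int := PySem.Dict.empty.insert 0 1
  let m := (PySem.List.pyRange 1 (n+1) 1).foldl
    (fun m i => (PySem.List.pyRange 1 (k+1) 1).foldl (ktreeInner i) m) m0
  m.getD n 0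

-- ===== PORT B =====
def ktreeStep (k : Int) (st : List Int × Int) (i : Int) : List Int × Int :=
  let w1 := st.2 + (PySem.List.pyGet? st.1 (i - 1)).getD 0
  let w2 := if i - k - 1 ≥ 0 then w1 - (PySem.List.pyGet? st.1 (i - k - 1)).getD 0 else w1
  (st.1 ++ [w2], w2)

def ktree_alt (n : Int) (k : Int) : Int :=
  if n < 0 then 0
  else if n = 0 then 1
  else if k ≤ 0 then 0
  else
    let st := (PySem.List.pyRange 1 (n+1) 1).foldl (ktreeStep k) ([1], 0)
    ((PySem.List.pyGet? st.1 n).getD 0)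

-- ===== PRECONDITION & SPEC =====
def Spec_ktree (n : Int) (k : Int) (out : Int) : Prop := out = ktree_alt n k
instance (n : Int) (k : Int) (out : Int) : Decidable (Spec_ktree n k out) := by unfold Spec_ktree; infer_instance

-- ===== CLAIM (what is proved, stated in full; the proofs are below) =====
def Claim_equal_ktree : Prop := ∀ (n : Int) (k : Int), Dom_ktree n k → Spec_ktree n k (ktree n k)

-- ===== LEMMAS AND PROOFS =====

-- the common dp table: dpl K i lists the composition counts dp[0..i] for parts 1..K
def dpl (K : Nat) : Nat → List Int
  | 0 => [1]
  | i+1 => dpl K i ++ [((dpl K i).drop (i+1-K)).sum]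

theorem length_dpl (K i : Nat) : (dpl K i).length = i + 1 := by
  induction i with
  | zero => rfl
  | succ i ih => simp [dpl, ih]

theorem dpl_prefix (K : Nat) {i j : Nat} (h : i ≤ j) : ∃ t, dpl K j = dpl K i ++ t := by
  induction j with
  | zero =>
    have h0 : i = 0 := Nat.le_zero.mp h
    exact ⟨[], by simp [h0]⟩
  | succ j ih =>
    rcases Nat.lt_or_ge i (j+1) with hlt | hge
    · obtain ⟨t, ht⟩ := ih (Nat.lt_succ_iff.mp hlt)
      exact ⟨t ++ [((dpl K j).drop (j+1-K)).sum], by simp [dpl, ht]⟩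
    · have : i = j + 1 := le_antisymm h hge
      exact ⟨[], by simp [this]⟩

theorem getElem?_dpl_mono (K : Nat) {x i j : Nat} (hx : x < i + 1) (h : i ≤ j) :
    (dpl K j)[x]? = (dpl K i)[x]? := by
  obtain ⟨t, ht⟩ := dpl_prefix K h
  rw [ht, List.getElem?_append_left (by rw [length_dpl]; omega)]

theorem getD_dpl_mono (K : Nat) {x i j : Nat} (hx : x < i + 1) (h : i ≤ j) :
    (dpl K j).getD x 0 = (dpl K i).getD x 0 := by
  simp [List.getD_eq_getElem?_getD, getElem?_dpl_mono K hx h]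

-- sliding-window step: removing the head of a drop
theorem drop_sum_succ (e : List Int) (m : Nat) (hm : m < e.length) :
    (e.drop m).sum = e[m] + (e.drop (m+1)).sum := by
  rw [List.drop_eq_getElem_cons hm, List.sum_cons]

theorem getD_dpl_self (K i : Nat) :
    (dpl K i).getD i 0 = (if i = 0 then 1 else ((dpl K (i-1)).drop (i-K)).sum) := by
  cases i with
  | zero => rfl
  | succ i =>
    simp only [dpl, Nat.succ_ne_zero, Nat.add_sub_cancel]
    rw [List.getD_eq_getElem?_getD]
    have := length_dpl K i
    rw [show i + 1 = (dpl K i).length by omega, List.getElem?_concat_length]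
    rfl

theorem getElem?_getD_dpl (K N x : Nat) (hx : x < N+1) :
    (dpl K N)[x]? = some ((dpl K N).getD x 0) := by
  have h := length_dpl K N
  rw [List.getElem?_eq_getElem (by omega), List.getD_eq_getElem _ _ (by omega)]

-- the sliding-window identity: the new window is old window + dp[N] - (dp[N-K] when it slides out)
theorem window_step (K N : Nat) (hK : 1 ≤ K) :
    ((dpl K N).drop (N+1-K)).sum
      = (if N = 0 then 0 else ((dpl K (N-1)).drop (N-K)).sum) + (dpl K N).getD N 0
        - (if K ≤ N then (dpl K N).getD (N-K) 0 else 0) := by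
  cases N with
  | zero =>
    have h0 : 1 - K = 0 := by omega
    have h1 : ¬ (K ≤ 0) := by omega
    simp [dpl, h0, h1]
  | succ M =>
    have hlen : (dpl K M).length = M + 1 := length_dpl K M
    have hW : (dpl K (M+1)).getD (M+1) 0 = ((dpl K M).drop (M+1-K)).sum := by
      rw [getD_dpl_self]; simp
    have hsplit : (dpl K (M+1)) = dpl K M ++ [((dpl K M).drop (M+1-K)).sum] := rfl
    simp only [Nat.succ_ne_zero, Nat.add_sub_cancel, hW]
    rw [hsplit, List.drop_append_of_le_length (by omega), List.sum_append, List.sum_cons,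
        List.sum_nil]
    by_cases hKM : K ≤ M + 1
    · rw [if_pos hKM]
      have hidx : M + 1 - K < (dpl K M).length := by omega
      have hstep := drop_sum_succ (dpl K M) (M+1-K) hidx
      have hgd : (dpl K M ++ [((dpl K M).drop (M+1-K)).sum]).getD (M+1-K) 0
          = (dpl K M)[M+1-K] := by
        rw [← hsplit, getD_dpl_mono K (i := M) (by omega) (by omega),
            List.getD_eq_getElem _ _ hidx]
      rw [hgd, show M+1+1-K = (M+1-K)+1 by omega]
      simp only [if_false]
      linarith [hstep]
    · rw [if_neg hKM, show M+1+1-K = 0 by omega, show M+1-K = 0 by omega]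
      simp

-- ===== B-side loop invariant =====
theorem B_loop (K : Nat) (hK : 1 ≤ K) (N : Nat) :
    (PySem.List.pyRange 1 ((N:Int)+1) 1).foldl (ktreeStep (K:Int)) ([1], 0)
      = (dpl K N, if N = 0 then 0 else ((dpl K (N-1)).drop (N-K)).sum) := by
  induction N with
  | zero =>
    rw [PySem.List.pyRange_one_eq_nil (by omega)]
    simp [dpl]
  | succ N ih =>
    have hcast : (((N+1:Nat)):Int)+1 = ((N:Int)+1)+1 := by push_cast; ring
    rw [hcast, PySem.List.pyRange_one_succ_right (by omega), List.foldl_append, ih]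
    simp only [List.foldl_cons, List.foldl_nil]
    unfold ktreeStep
    simp only []
    rw [show (N:Int)+1-1 = ((N:Nat):Int) by ring, PySem.List.pyGet?_natCast,
        getElem?_getD_dpl K N N (by omega)]
    have hsplit : dpl K (N+1) = dpl K N ++ [((dpl K N).drop (N+1-K)).sum] := rfl
    have hw := window_step K N hK
    by_cases hKN : K ≤ N
    · rw [if_pos (show (N:Int)+1-(K:Int)-1 ≥ 0 by omega),
          show (N:Int)+1-(K:Int)-1 = ((N-K:Nat):Int) by omega, PySem.List.pyGet?_natCast,
          getElem?_getD_dpl K N (N-K) (by omega)]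
      rw [if_pos hKN] at hw
      simp only [Option.getD_some, hsplit, Nat.add_sub_cancel]
      rw [← hw]
      simp
    · rw [if_neg (show ¬ ((N:Int)+1-(K:Int)-1 ≥ 0) by omega)]
      rw [if_neg hKN, sub_zero] at hw
      simp only [Option.getD_some, hsplit, Nat.add_sub_cancel]
      rw [← hw]
      simp

-- ===== A-side loop invariants =====
theorem A_inner (K N : Nat) (m : PySem.Dict Int Int)
    (h1 : ∀ x : Int, m.getD x 0 = if 0 ≤ x ∧ x ≤ (N:Int) then (dpl K N).getD x.toNat 0 else 0)
    (h2 : ∀ x : Int, m.contains x = decide (0 ≤ x ∧ x ≤ (N:Int))) (t : Nat) :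
    (∀ x : Int, x ≠ (N:Int)+1 →
      ((PySem.List.pyRange 1 ((t:Int)+1) 1).foldl (ktreeInner ((N:Int)+1)) m).getD x 0 = m.getD x 0)
    ∧ ((PySem.List.pyRange 1 ((t:Int)+1) 1).foldl (ktreeInner ((N:Int)+1)) m).getD ((N:Int)+1) 0
        = ((dpl K N).drop (N+1-t)).sum
    ∧ (∀ x : Int, ((PySem.List.pyRange 1 ((t:Int)+1) 1).foldl (ktreeInner ((N:Int)+1)) m).contains x
        = (m.contains x || (decide (x = (N:Int)+1) && decide (1 ≤ t)))) := by
  induction t with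
  | zero =>
    rw [show ((0:Nat):Int)+1 = 1 by norm_num, PySem.List.pyRange_one_eq_nil (by omega)]
    refine ⟨fun x _ => rfl, ?_, fun x => by simp⟩
    rw [List.foldl_nil, h1, List.drop_eq_nil_of_le (by rw [length_dpl]; omega)]
    simp only [List.sum_nil]
    split_ifs with h
    · omega
    · rfl
  | succ t ih =>
    obtain ⟨ih1, ih2, ih3⟩ := ih
    have hcast : (((t+1:Nat)):Int)+1 = ((t:Int)+1)+1 := by push_cast; ring
    rw [hcast, PySem.List.pyRange_one_succ_right (by omega), List.foldl_append]
    set m₁ := (PySem.List.pyRange 1 ((t:Int)+1) 1).foldl (ktreeInner ((N:Int)+1)) m with hm₁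
    simp only [List.foldl_cons, List.foldl_nil]
    unfold ktreeInner
    simp only []
    have hdiff : (N:Int)+1-((t:Int)+1) = (N:Int)-t := by ring
    have hcont : m₁.contains ((N:Int)-t) = decide (t ≤ N) := by
      rw [ih3, h2]
      by_cases ht : t ≤ N
      · simp [ht]
      · simp [ht]; omega
    rw [hdiff, hcont]
    by_cases ht : t ≤ N
    · rw [if_pos (by simp [ht])]
      have hgd : m₁.getD ((N:Int)-t) 0 = (dpl K N).getD (N-t) 0 := by
        rw [ih1 _ (by omega), h1, if_pos (by omega),
            show ((N:Int)-t).toNat = N - t by omega]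
      have hidx : N - t < (dpl K N).length := by rw [length_dpl]; omega
      have hstep : ((dpl K N).drop (N-t)).sum
          = (dpl K N).getD (N-t) 0 + ((dpl K N).drop (N-t+1)).sum := by
        rw [List.getD_eq_getElem _ _ hidx]; exact drop_sum_succ _ _ hidx
      refine ⟨?_, ?_, ?_⟩
      · intro x hx
        rw [PySem.Dict.getD_insert, if_neg hx, ih1 _ hx]
      · rw [PySem.Dict.getD_insert, if_pos rfl, ih2, hgd,
            show N+1-t = (N-t)+1 by omega, show N+1-(t+1) = N-t by omega]
        linarith [hstep]
      · intro x
        rw [PySem.Dict.contains_insert, ih3]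
        by_cases hx : x = (N:Int)+1
        · simp [hx]
        · simp [hx]
    · rw [if_neg (by simp [ht])]
      refine ⟨ih1, ?_, ?_⟩
      · rw [ih2, show N+1-t = N+1-(t+1) by omega]
      · intro x
        rw [ih3]
        have ht1 : 1 ≤ t := by omega
        simp [ht1]

theorem A_loop (K : Nat) (hK : 1 ≤ K) (N : Nat) :
    (∀ x : Int, ((PySem.List.pyRange 1 ((N:Int)+1) 1).foldl
        (fun m i => (PySem.List.pyRange 1 ((K:Int)+1) 1).foldl (ktreeInner i) m)
        (PySem.Dict.empty.insert 0 1)).getD x 0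
      = if 0 ≤ x ∧ x ≤ (N:Int) then (dpl K N).getD x.toNat 0 else 0)
    ∧ (∀ x : Int, ((PySem.List.pyRange 1 ((N:Int)+1) 1).foldl
        (fun m i => (PySem.List.pyRange 1 ((K:Int)+1) 1).foldl (ktreeInner i) m)
        (PySem.Dict.empty.insert 0 1)).contains x = decide (0 ≤ x ∧ x ≤ (N:Int))) := by
  induction N with
  | zero =>
    constructor <;> intro x <;>
      rw [show ((0:Nat):Int)+1 = 1 by norm_num,
          PySem.List.pyRange_one_eq_nil (a := 1) (b := 1) (by omega), List.foldl_nil]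
    · rw [PySem.Dict.getD_insert]
      by_cases hx : x = 0
      · simp [hx, dpl]
      · have hns : ¬ (0 ≤ x ∧ x ≤ ((0:Nat):Int)) := by omega
        rw [if_neg hx, if_neg hns, PySem.Dict.getD_empty]
    · rw [PySem.Dict.contains_insert, PySem.Dict.contains_empty, Bool.eq_iff_iff]
      simp only [Bool.or_eq_true, beq_iff_eq, decide_eq_true_eq, Bool.false_eq_true, or_false]
      omega
  | succ N ih =>
    obtain ⟨ih1, ih2⟩ := ih
    obtain ⟨k1, k2, k3⟩ := A_inner K N _ ih1 ih2 K
    have hcast : (((N+1:Nat)):Int)+1 = ((N:Int)+1)+1 := by push_cast; ring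
    constructor <;> intro x <;>
      rw [hcast, PySem.List.pyRange_one_succ_right (a := 1) (b := (N:Int)+1) (by omega),
          List.foldl_append] <;>
      simp only [List.foldl_cons, List.foldl_nil]
    · by_cases hx : x = (N:Int)+1
      · rw [hx, k2, if_pos (by push_cast; omega),
            show (((N:Int)+1)).toNat = N+1 by omega, getD_dpl_self]
        simp
      · rw [k1 x hx, ih1]
        by_cases hx2 : 0 ≤ x ∧ x ≤ (N:Int)
        · rw [if_pos hx2, if_pos (by push_cast; omega)]
          exact (getD_dpl_mono K (x := x.toNat) (i := N) (j := N+1) (by omega) (by omega)).symm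
        · rw [if_neg hx2, if_neg (by push_cast; omega)]
    · rw [k3, ih2, Bool.eq_iff_iff]
      simp only [Bool.or_eq_true, Bool.and_eq_true, decide_eq_true_eq]
      push_cast
      omega

-- ===== VERDICT (by name: the statement is the Claim_ definition above) =====
theorem ktree_spec : Claim_equal_ktree := by
  unfold Claim_equal_ktree Spec_ktree
  intro n k _
  unfold ktree ktree_alt
  simp only []
  by_cases hn : n < 0
  · rw [if_pos hn, PySem.List.pyRange_one_eq_nil (a := 1) (b := n+1) (by omega), List.foldl_nil,
        PySem.Dict.getD_insert, if_neg (by omega), PySem.Dict.getD_empty]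
  · rw [if_neg hn]
    by_cases hn0 : n = 0
    · rw [if_pos hn0, hn0, PySem.List.pyRange_one_eq_nil (a := 1) (b := 0+1) (by omega),
          List.foldl_nil, PySem.Dict.getD_insert, if_pos rfl]
    · rw [if_neg hn0]
      by_cases hk : k ≤ 0
      · rw [if_pos hk, PySem.List.pyRange_one_eq_nil (a := 1) (b := k+1) (by omega)]
        simp only [List.foldl_nil]
        rw [List.foldl_fixed, PySem.Dict.getD_insert, if_neg hn0, PySem.Dict.getD_empty]
      · rw [if_neg hk]
        have hn' : ((n.toNat:Nat):Int) = n := Int.toNat_of_nonneg (by omega)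
        have hk' : ((k.toNat:Nat):Int) = k := Int.toNat_of_nonneg (by omega)
        have hK : 1 ≤ k.toNat := by omega
        obtain ⟨a1, a2⟩ := A_loop k.toNat hK n.toNat
        have hb := B_loop k.toNat hK n.toNat
        rw [← hn', ← hk', hb, a1]
        simp only []
        rw [if_pos (by omega), PySem.List.pyGet?_natCast,
            getElem?_getD_dpl k.toNat n.toNat n.toNat (by omega),
            show (((n.toNat:Nat):Int)).toNat = n.toNat by omega, Option.getD_some]
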